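-- pv_equiv track=rewrite | github.com/dirkraft/sheeetz | backend/sheeetz/storage/metadata.py | map_raw_to_core
-- ===== SOURCE A (Python) =====
-- SHEEETZ_NS = "http://sheeetz.app/meta/1.0/"
--
-- RAW_TO_CORE_MAP: dict[str, str] = {
--     # Sheeetz namespace (highest priority — user edits)
--     f"{{{SHEEETZ_NS}}}title": "title",
--     f"{{{SHEEETZ_NS}}}composer": "composer",
--     f"{{{SHEEETZ_NS}}}tags": "tags",
--     # Standard PDF/XMP keys (fallback from original PDF)
--     "title": "title",
--     "dc:title": "title",
--     "{http://purl.org/dc/elements/1.1/}title": "title",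
--     "author": "composer",
--     "dc:creator": "composer",
--     "{http://purl.org/dc/elements/1.1/}creator": "composer",
--     "keywords": "tags",
--     "pdf:keywords": "tags",
--     "{http://ns.adobe.com/pdf/1.3/}keywords": "tags",
-- }
--
-- def map_raw_to_core(raw_meta: dict[str, str]) -> dict[str, str]:
--     """Map raw PDF metadata to core sheet music fields. First match wins per core key.
--
--     Also extracts arbitrary sheeetz-namespace keys not in RAW_TO_CORE_MAP as custom fields.
--     """
--     core: dict[str, str] = {}
--
--     # Always include pages if present
--     if "pages" in raw_meta:
--         core["pages"] = raw_meta["pages"]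
--
--     # Map raw keys to core keys (case-insensitive matching)
--     raw_lower = {k.lower(): v for k, v in raw_meta.items()}
--     seen_core_keys: set[str] = set()
--
--     for raw_key_lower, core_key in RAW_TO_CORE_MAP.items():
--         if core_key in seen_core_keys:
--             continue
--         value = raw_lower.get(raw_key_lower, "").strip()
--         if value:
--             core[core_key] = value
--             seen_core_keys.add(core_key)
--
--     # Extract arbitrary sheeetz-namespace keys not already mapped
--     sheeetz_prefix = f"{{{SHEEETZ_NS}}}"
--     mapped_sheeetz_keys = {k.lower() for k in RAW_TO_CORE_MAP if k.startswith(sheeetz_prefix)}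
--     for raw_key, value in raw_meta.items():
--         if raw_key.startswith(sheeetz_prefix) and raw_key.lower() not in mapped_sheeetz_keys:
--             field_name = raw_key[len(sheeetz_prefix):]
--             if field_name and field_name != "pages" and value.strip():
--                 core[field_name] = value.strip()
--
--     return core
-- ===== SOURCE B (Python) =====
-- SHEEETZ_NS = "http://sheeetz.app/meta/1.0/"
-- PREFIX = "{" + SHEEETZ_NS + "}"
--
-- # Reverse index: recognised (lowercase) raw key -> (priority, core field).
-- FIELD_INDEX = {
--     PREFIX + "title": (0, "title"),
--     PREFIX + "composer": (1, "composer"),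
--     PREFIX + "tags": (2, "tags"),
--     "title": (3, "title"),
--     "dc:title": (4, "title"),
--     "{http://purl.org/dc/elements/1.1/}title": (5, "title"),
--     "author": (6, "composer"),
--     "dc:creator": (7, "composer"),
--     "{http://purl.org/dc/elements/1.1/}creator": (8, "composer"),
--     "keywords": (9, "tags"),
--     "pdf:keywords": (10, "tags"),
--     "{http://ns.adobe.com/pdf/1.3/}keywords": (11, "tags"),
-- }
--
--
-- def map_raw_to_core(raw_meta):
--     """Map raw PDF metadata to core sheet music fields.
--
--     Scans the input once against a reverse index, then merges the hits in
--     priority order; also extracts arbitrary sheeetz-namespace keys as custom fields.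
--     """
--     core = {}
--     if "pages" in raw_meta:
--         core["pages"] = raw_meta["pages"]
--
--     raw_lower = {k.lower(): v for k, v in raw_meta.items()}
--
--     # Index every recognised key of the input by its priority.
--     hits = {}
--     for key, value in raw_lower.items():
--         if key in FIELD_INDEX and value.strip():
--             prio, field = FIELD_INDEX[key]
--             hits[prio] = (field, value.strip())
--
--     # Merge the hits from best to worst priority; the best one per field wins.
--     for prio in sorted(hits):
--         field, value = hits[prio]
--         if field not in core:
--             core[field] = value
--
--     # Custom sheeetz-namespace fields not covered by the index.
--     mapped_ns = {k for k in FIELD_INDEX if k.startswith(PREFIX)}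
--     for raw_key, value in raw_meta.items():
--         if raw_key.startswith(PREFIX) and raw_key.lower() not in mapped_ns:
--             field_name = raw_key[len(PREFIX):]
--             if field_name and field_name != "pages" and value.strip():
--                 core[field_name] = value.strip()
--     return core
-- ===== Notes on version B (the rewrite author's own statement) =====
-- stated objective: alternative
-- what changed: A scans the fixed priority table against raw_lower with a seen-set of core keys; B instead scans the input once against a reverse index (lowercase raw key -> (priority, field)), collects the hits keyed by priority, and merges them in sorted priority order, first hit per field winning; the pages shortcut and the custom sheeetz-namespace pass are unchanged.
import Mathlib
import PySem

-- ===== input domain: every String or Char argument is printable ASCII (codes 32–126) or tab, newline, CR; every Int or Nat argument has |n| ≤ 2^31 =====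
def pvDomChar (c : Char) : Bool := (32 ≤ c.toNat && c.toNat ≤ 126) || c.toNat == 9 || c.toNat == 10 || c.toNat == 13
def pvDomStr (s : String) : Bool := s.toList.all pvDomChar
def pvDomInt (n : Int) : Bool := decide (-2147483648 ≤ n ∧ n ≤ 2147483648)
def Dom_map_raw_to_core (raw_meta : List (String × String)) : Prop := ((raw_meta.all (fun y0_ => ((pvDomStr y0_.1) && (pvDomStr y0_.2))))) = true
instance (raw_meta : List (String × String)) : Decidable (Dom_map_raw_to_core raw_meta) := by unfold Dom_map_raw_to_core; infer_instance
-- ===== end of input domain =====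

-- B replaces A's scan of the priority table guarded by a seen-set with a single scan of the
-- input against a reverse index followed by a priority-ordered merge; return value only.

-- ===== PORT A =====
-- "{" ++ SHEEETZ_NS ++ "}" (the f-string prefix both passes use)
def pvPrefix : String := "{http://sheeetz.app/meta/1.0/}"

-- RAW_TO_CORE_MAP as an association list in insertion order
def pvMap : List (String × String) := [
  ("{http://sheeetz.app/meta/1.0/}title", "title"),
  ("{http://sheeetz.app/meta/1.0/}composer", "composer"),
  ("{http://sheeetz.app/meta/1.0/}tags", "tags"),
  ("title", "title"),
  ("dc:title", "title"),
  ("{http://purl.org/dc/elements/1.1/}title", "title"),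
  ("author", "composer"),
  ("dc:creator", "composer"),
  ("{http://purl.org/dc/elements/1.1/}creator", "composer"),
  ("keywords", "tags"),
  ("pdf:keywords", "tags"),
  ("{http://ns.adobe.com/pdf/1.3/}keywords", "tags")]

-- core = {}; if "pages" in raw_meta: core["pages"] = raw_meta["pages"]
-- (the subscript is under the containment guard, so getD with any default is exact)
def pvCore0 (raw : PySem.Dict String String) : PySem.Dict String String :=
  if PySem.Dict.contains raw "pages" then
    PySem.Dict.insert PySem.Dict.empty "pages" (PySem.Dict.getD raw "pages" "")
  else PySem.Dict.empty

-- raw_lower = {k.lower(): v for k, v in raw_meta.items()}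
def pvRawLower (raw : PySem.Dict String String) : PySem.Dict String String :=
  (PySem.Dict.items raw).foldl
    (fun d p => PySem.Dict.insert d (PySem.Str.lower p.1) p.2) PySem.Dict.empty

-- the 'for raw_key_lower, core_key in RAW_TO_CORE_MAP.items()' loop with seen_core_keys
def pvMidA (rl core : PySem.Dict String String) : PySem.Dict String String :=
  (pvMap.foldl
    (fun (st : PySem.Dict String String × PySem.Set String) kv =>
      if PySem.Set.contains st.2 kv.2 then st
      else
        let value := PySem.Str.strip (PySem.Dict.getD rl kv.1 "")
        if value ≠ "" then (PySem.Dict.insert st.1 kv.2 value, PySem.Set.add st.2 kv.2)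
        else st)
    (core, PySem.Set.empty)).1

-- mapped_sheeetz_keys = {k.lower() for k in RAW_TO_CORE_MAP if k.startswith(sheeetz_prefix)}
def pvMappedA : PySem.Set String :=
  PySem.Set.ofList
    (((pvMap.map (·.1)).filter (fun k => PySem.Str.startswith k pvPrefix)).map PySem.Str.lower)

-- the final 'for raw_key, value in raw_meta.items()' extraction loop (identical in A and B)
def pvCustomPass (raw : PySem.Dict String String) (mapped : PySem.Set String)
    (core : PySem.Dict String String) : PySem.Dict String String :=
  (PySem.Dict.items raw).foldl
    (fun c p =>
      if PySem.Str.startswith p.1 pvPrefix && !(PySem.Set.contains mapped (PySem.Str.lower p.1)) then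
        let field := PySem.Str.slice p.1 (some (PySem.Str.len pvPrefix)) none
        if field ≠ "" ∧ field ≠ "pages" ∧ PySem.Str.strip p.2 ≠ "" then
          PySem.Dict.insert c field (PySem.Str.strip p.2)
        else c
      else c)
    core

def map_raw_to_core (raw_meta : List (String × String)) : List (String × String) :=
  let raw := PySem.Dict.ofList raw_meta
  PySem.Dict.items (pvCustomPass raw pvMappedA (pvMidA (pvRawLower raw) (pvCore0 raw)))

-- ===== PORT B =====
-- FIELD_INDEX: reverse index, recognised lowercase raw key -> (priority, core field)
def pvIndexD : PySem.Dict String (Int × String) := PySem.Dict.ofList [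
  ("{http://sheeetz.app/meta/1.0/}title", (0, "title")),
  ("{http://sheeetz.app/meta/1.0/}composer", (1, "composer")),
  ("{http://sheeetz.app/meta/1.0/}tags", (2, "tags")),
  ("title", (3, "title")),
  ("dc:title", (4, "title")),
  ("{http://purl.org/dc/elements/1.1/}title", (5, "title")),
  ("author", (6, "composer")),
  ("dc:creator", (7, "composer")),
  ("{http://purl.org/dc/elements/1.1/}creator", (8, "composer")),
  ("keywords", (9, "tags")),
  ("pdf:keywords", (10, "tags")),
  ("{http://ns.adobe.com/pdf/1.3/}keywords", (11, "tags"))]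

-- 'for key, value in raw_lower.items(): if key in FIELD_INDEX and value.strip(): hits[prio] = …'
-- (the subscript FIELD_INDEX[key] sits under the containment guard, so getD is exact)
def pvHits (rl : PySem.Dict String String) : PySem.Dict Int (String × String) :=
  (PySem.Dict.items rl).foldl
    (fun h kv =>
      if PySem.Dict.contains pvIndexD kv.1 ∧ PySem.Str.strip kv.2 ≠ "" then
        PySem.Dict.insert h (PySem.Dict.getD pvIndexD kv.1 (0, "")).1
          ((PySem.Dict.getD pvIndexD kv.1 (0, "")).2, PySem.Str.strip kv.2)
      else h)
    PySem.Dict.empty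

-- 'for prio in sorted(hits): field, value = hits[prio]; if field not in core: core[field] = value'
def pvMidB (rl core : PySem.Dict String String) : PySem.Dict String String :=
  (PySem.List.sorted (PySem.Dict.keys (pvHits rl)) (fun p => p) false).foldl
    (fun c p =>
      let fv := PySem.Dict.getD (pvHits rl) p ("", "")
      if PySem.Dict.contains c fv.1 then c else PySem.Dict.insert c fv.1 fv.2)
    core

-- mapped_ns = {k for k in FIELD_INDEX if k.startswith(PREFIX)}
def pvMappedB : PySem.Set String :=
  PySem.Set.ofList ((PySem.Dict.keys pvIndexD).filter (fun k => PySem.Str.startswith k pvPrefix))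

def map_raw_to_core_alt (raw_meta : List (String × String)) : List (String × String) :=
  let raw := PySem.Dict.ofList raw_meta
  PySem.Dict.items (pvCustomPass raw pvMappedB (pvMidB (pvRawLower raw) (pvCore0 raw)))

-- ===== PRECONDITION & SPEC =====
def Spec_map_raw_to_core (raw_meta : List (String × String)) (out : List (String × String)) : Prop := out = map_raw_to_core_alt raw_meta
instance (raw_meta : List (String × String)) (out : List (String × String)) : Decidable (Spec_map_raw_to_core raw_meta out) := by unfold Spec_map_raw_to_core; infer_instance

-- ===== CLAIM (what is proved, stated in full; the proofs are below) =====
def Claim_equal_map_raw_to_core : Prop := ∀ (raw_meta : List (String × String)), Dom_map_raw_to_core raw_meta → Spec_map_raw_to_core raw_meta (map_raw_to_core raw_meta)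

-- ===== LEMMAS AND PROOFS =====

-- the priority table as an explicit (priority, raw key, core field) list, in priority order
def pvTbl : List (Int × String × String) := [
  (0, "{http://sheeetz.app/meta/1.0/}title", "title"),
  (1, "{http://sheeetz.app/meta/1.0/}composer", "composer"),
  (2, "{http://sheeetz.app/meta/1.0/}tags", "tags"),
  (3, "title", "title"),
  (4, "dc:title", "title"),
  (5, "{http://purl.org/dc/elements/1.1/}title", "title"),
  (6, "author", "composer"),
  (7, "dc:creator", "composer"),
  (8, "{http://purl.org/dc/elements/1.1/}creator", "composer"),
  (9, "keywords", "tags"),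
  (10, "pdf:keywords", "tags"),
  (11, "{http://ns.adobe.com/pdf/1.3/}keywords", "tags")]

-- 'this table entry produced a hit': its raw key is in raw_lower with a non-blank value
def pvPres (rl : PySem.Dict String String) (e : Int × String × String) : Bool :=
  PySem.Dict.contains rl e.2.1 && decide (PySem.Str.strip (PySem.Dict.getD rl e.2.1 "") ≠ "")

-- the guard of B's input scan, as a Bool predicate
def pvGB (kv : String × String) : Bool :=
  PySem.Dict.contains pvIndexD kv.1 && decide (PySem.Str.strip kv.2 ≠ "")

def pvPrioOf (kv : String × String) : Int := (PySem.Dict.getD pvIndexD kv.1 (0, "")).1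
def pvValOf (kv : String × String) : String × String :=
  ((PySem.Dict.getD pvIndexD kv.1 (0, "")).2, PySem.Str.strip kv.2)

-- the writers: items of raw_lower that pass B's guard
def pvW (rl : PySem.Dict String String) : List (String × String) :=
  (PySem.Dict.items rl).filter pvGB

-- A's loop body, re-indexed by the table entries
def pvStepA (rl : PySem.Dict String String)
    (st : PySem.Dict String String × PySem.Set String) (e : Int × String × String) :
    PySem.Dict String String × PySem.Set String :=
  if PySem.Set.contains st.2 e.2.2 then st
  else
    let value := PySem.Str.strip (PySem.Dict.getD rl e.2.1 "")
    if value ≠ "" then (PySem.Dict.insert st.1 e.2.2 value, PySem.Set.add st.2 e.2.2)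
    else st

-- B's merge body, re-indexed by the table entries
def pvStepB (rl : PySem.Dict String String)
    (c : PySem.Dict String String) (e : Int × String × String) : PySem.Dict String String :=
  if PySem.Dict.contains c e.2.2 then c
  else PySem.Dict.insert c e.2.2 (PySem.Str.strip (PySem.Dict.getD rl e.2.1 ""))

-- index facts (finite checks over the 12 entries)
lemma pvIdx_prio_inj : ∀ s ∈ PySem.Dict.keys pvIndexD, ∀ t ∈ PySem.Dict.keys pvIndexD,
    (PySem.Dict.getD pvIndexD s (0, "")).1 = (PySem.Dict.getD pvIndexD t (0, "")).1 → s = t := by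
  decide

lemma pvIdx_to_tbl : ∀ k ∈ PySem.Dict.keys pvIndexD, ∃ e ∈ pvTbl,
    e.2.1 = k ∧ PySem.Dict.getD pvIndexD k (0, "") = (e.1, e.2.2) := by decide

lemma pvTbl_to_idx : ∀ e ∈ pvTbl, PySem.Dict.contains pvIndexD e.2.1 = true ∧
    PySem.Dict.getD pvIndexD e.2.1 (0, "") = (e.1, e.2.2) := by decide

lemma pvTbl_field_ne_pages : ∀ e ∈ pvTbl, e.2.2 ≠ "pages" := by decide

lemma pvTbl_prio_pairwise : (pvTbl.map (·.1)).Pairwise (· < ·) := by decide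

lemma pvMap_eq_tbl_map : pvMap = pvTbl.map (fun e => (e.2.1, e.2.2)) := by decide

lemma pvMapped_eq : pvMappedA = pvMappedB := by decide

-- raw_lower has unique keys
lemma pvRawLower_nodup (raw : PySem.Dict String String) : (PySem.Dict.keys (pvRawLower raw)).Nodup := by
  unfold pvRawLower
  exact PySem.Dict.nodup_keys_foldl_insert_key _ _ _ _ PySem.Dict.nodup_keys_empty

-- B's scan is a fold over the writers only
lemma pvHits_eq_fold (rl : PySem.Dict String String) :
    pvHits rl = (pvW rl).foldl
      (fun h kv => PySem.Dict.insert h (pvPrioOf kv) (pvValOf kv)) PySem.Dict.empty := by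
  unfold pvHits pvW
  rw [List.foldl_filter]
  refine PySem.List.foldl_congr_mem _ _ _ _ ?_
  intro acc kv _
  by_cases h1 : PySem.Dict.contains pvIndexD kv.1 = true <;>
    by_cases h2 : PySem.Str.strip kv.2 ≠ "" <;>
      simp [pvGB, pvPrioOf, pvValOf, h1, h2]

lemma pvW_fst_nodup (rl : PySem.Dict String String) (hnd : (PySem.Dict.keys rl).Nodup) :
    ((pvW rl).map Prod.fst).Nodup := by
  have hsub : ((pvW rl).map Prod.fst).Sublist ((PySem.Dict.items rl).map Prod.fst) :=
    List.filter_sublist.map _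
  exact hnd.sublist hsub

lemma pvW_mem_contains {rl : PySem.Dict String String} {kv : String × String}
    (h : kv ∈ pvW rl) : PySem.Dict.contains pvIndexD kv.1 = true ∧ PySem.Str.strip kv.2 ≠ "" := by
  have h2 := (List.mem_filter.mp h).2
  unfold pvGB at h2
  simpa using h2

lemma pvW_prio_nodup (rl : PySem.Dict String String) (hnd : (PySem.Dict.keys rl).Nodup) :
    ((pvW rl).map pvPrioOf).Nodup := by
  have hfst := pvW_fst_nodup rl hnd
  refine List.Nodup.map_on ?_ (List.Nodup.of_map Prod.fst hfst)
  intro x hx y hy hpf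
  have hcx := (pvW_mem_contains hx).1
  have hcy := (pvW_mem_contains hy).1
  have h1 : x.1 = y.1 :=
    pvIdx_prio_inj x.1 ((PySem.Dict.contains_iff_mem_keys _ _).mp hcx)
      y.1 ((PySem.Dict.contains_iff_mem_keys _ _).mp hcy) hpf
  exact List.inj_on_of_nodup_map hfst hx hy h1

lemma pvHits_items (rl : PySem.Dict String String) (hnd : (PySem.Dict.keys rl).Nodup) :
    (pvHits rl).items = (pvW rl).map (fun kv => (pvPrioOf kv, pvValOf kv)) := by
  rw [pvHits_eq_fold]
  rw [PySem.Dict.items_foldl_insert_fresh (pvW rl) pvPrioOf pvValOf PySem.Dict.empty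
    (fun a _ => by simp [PySem.Dict.contains_empty]) (pvW_prio_nodup rl hnd)]
  simp [PySem.Dict.empty]

lemma pvHits_keys (rl : PySem.Dict String String) (hnd : (PySem.Dict.keys rl).Nodup) :
    PySem.Dict.keys (pvHits rl) = (pvW rl).map pvPrioOf := by
  show ((pvHits rl).items).map Prod.fst = _
  rw [pvHits_items rl hnd, List.map_map]
  rfl

-- the priorities hit by the scan are exactly the priorities of the present table entries
lemma pvMem_iff (rl : PySem.Dict String String) (hnd : (PySem.Dict.keys rl).Nodup) (p : Int) :
    p ∈ (pvW rl).map pvPrioOf ↔ p ∈ (pvTbl.filter (pvPres rl)).map (·.1) := by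
  constructor
  · rintro hmem
    obtain ⟨kv, hkv, rfl⟩ := List.mem_map.mp hmem
    obtain ⟨hc, hs⟩ := pvW_mem_contains hkv
    obtain ⟨e, he, hek, hegd⟩ := pvIdx_to_tbl kv.1 ((PySem.Dict.contains_iff_mem_keys _ _).mp hc)
    have hkvitems : kv ∈ (PySem.Dict.items rl) := (List.mem_filter.mp hkv).1
    have hgd : PySem.Dict.getD rl kv.1 "" = kv.2 := by
      obtain ⟨k, v⟩ := kv
      exact PySem.Dict.getD_of_mem_items rl hkvitems hnd ""
    refine List.mem_map.mpr ⟨e, List.mem_filter.mpr ⟨he, ?_⟩, ?_⟩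
    · unfold pvPres
      rw [hek, hgd]
      simp [hs, (PySem.Dict.contains_iff_mem_keys rl kv.1).mpr
        (PySem.Dict.mem_keys_of_mem_items rl hkvitems)]
    · unfold pvPrioOf
      rw [hegd]
  · intro hmem
    obtain ⟨e, he, rfl⟩ := List.mem_map.mp hmem
    have hef := List.mem_filter.mp he
    have hpres := hef.2
    unfold pvPres at hpres
    obtain ⟨hcrl, hsne⟩ := by simpa using hpres
    obtain ⟨hcidx, hegd⟩ := pvTbl_to_idx e hef.1
    have hsome : ∃ v, PySem.Dict.get? rl e.2.1 = some v := by
      have := PySem.Dict.contains_eq_isSome_get? rl e.2.1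
      rw [hcrl] at this
      exact Option.isSome_iff_exists.mp this.symm
    obtain ⟨v, hv⟩ := hsome
    have hgd : PySem.Dict.getD rl e.2.1 "" = v := PySem.Dict.getD_of_get?_eq_some rl "" hv
    refine List.mem_map.mpr ⟨(e.2.1, v), List.mem_filter.mpr
      ⟨PySem.Dict.mem_items_of_get?_eq_some rl hv, ?_⟩, ?_⟩
    · unfold pvGB
      simp only [hcidx, Bool.true_and, decide_eq_true_eq]
      rw [← hgd]; exact hsne
    · unfold pvPrioOf
      rw [hegd]

lemma pvPlist_pairwise (rl : PySem.Dict String String) :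
    ((pvTbl.filter (pvPres rl)).map (·.1)).Pairwise (· < ·) :=
  List.Pairwise.sublist (List.filter_sublist.map _) pvTbl_prio_pairwise

lemma pvSorted_keys (rl : PySem.Dict String String) (hnd : (PySem.Dict.keys rl).Nodup) :
    PySem.List.sorted (PySem.Dict.keys (pvHits rl)) (fun p => p) false =
      (pvTbl.filter (pvPres rl)).map (·.1) := by
  apply PySem.List.sorted_eq_of_perm_of_pairwise_lt
  · rw [pvHits_keys rl hnd]
    refine (List.perm_ext_iff_of_nodup ?_ (pvW_prio_nodup rl hnd)).mpr ?_
    · exact (pvPlist_pairwise rl).imp ne_of_lt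
    · intro a; exact (pvMem_iff rl hnd a).symm
  · exact pvPlist_pairwise rl

lemma pvHits_getD (rl : PySem.Dict String String) (hnd : (PySem.Dict.keys rl).Nodup) :
    ∀ e ∈ pvTbl.filter (pvPres rl),
      PySem.Dict.getD (pvHits rl) e.1 ("", "") =
        (e.2.2, PySem.Str.strip (PySem.Dict.getD rl e.2.1 "")) := by
  intro e he
  have hef := List.mem_filter.mp he
  have hpres := hef.2
  unfold pvPres at hpres
  obtain ⟨hcrl, hsne⟩ := by simpa using hpres
  obtain ⟨hcidx, hegd⟩ := pvTbl_to_idx e hef.1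
  have hsome : ∃ v, PySem.Dict.get? rl e.2.1 = some v := by
    have := PySem.Dict.contains_eq_isSome_get? rl e.2.1
    rw [hcrl] at this
    exact Option.isSome_iff_exists.mp this.symm
  obtain ⟨v, hv⟩ := hsome
  have hgd : PySem.Dict.getD rl e.2.1 "" = v := PySem.Dict.getD_of_get?_eq_some rl "" hv
  have hwmem : (e.2.1, v) ∈ pvW rl := by
    refine List.mem_filter.mpr ⟨PySem.Dict.mem_items_of_get?_eq_some rl hv, ?_⟩
    unfold pvGB
    simp only [hcidx, Bool.true_and, decide_eq_true_eq]
    rw [← hgd]; exact hsne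
  have hitem : (e.1, (e.2.2, PySem.Str.strip v)) ∈ (pvHits rl).items := by
    rw [pvHits_items rl hnd]
    refine List.mem_map.mpr ⟨(e.2.1, v), hwmem, ?_⟩
    unfold pvPrioOf pvValOf
    rw [hegd]
  have hkeysnd : (PySem.Dict.keys (pvHits rl)).Nodup := by
    rw [pvHits_keys rl hnd]; exact pvW_prio_nodup rl hnd
  rw [PySem.Dict.getD_of_mem_items _ hitem hkeysnd, hgd]

lemma pvMidB_eq (rl core : PySem.Dict String String) (hnd : (PySem.Dict.keys rl).Nodup) :
    pvMidB rl core = (pvTbl.filter (pvPres rl)).foldl (pvStepB rl) core := by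
  unfold pvMidB
  rw [pvSorted_keys rl hnd, List.foldl_map]
  refine PySem.List.foldl_congr_mem _ _ _ _ ?_
  intro c e he
  rw [pvHits_getD rl hnd e he]
  rfl

lemma pvMidA_eq (rl core : PySem.Dict String String) :
    pvMidA rl core = (pvTbl.foldl (pvStepA rl) (core, PySem.Set.empty)).1 := by
  unfold pvMidA
  rw [pvMap_eq_tbl_map, List.foldl_map]
  rfl

-- A's fold with a seen-set equals B's fold over the present entries, while seen mirrors core
lemma pvBridge (rl : PySem.Dict String String) :
    ∀ (es : List (Int × String × String)) (core : PySem.Dict String String) (seen : PySem.Set String),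
      (∀ e ∈ es, PySem.Set.contains seen e.2.2 = PySem.Dict.contains core e.2.2) →
      (es.foldl (pvStepA rl) (core, seen)).1 = (es.filter (pvPres rl)).foldl (pvStepB rl) core := by
  intro es
  induction es with
  | nil => intro core seen _; simp
  | cons e es ih =>
    intro core seen hinv
    have hinv_e := hinv e (List.mem_cons_self)
    have hinv' : ∀ e' ∈ es, PySem.Set.contains seen e'.2.2 = PySem.Dict.contains core e'.2.2 :=
      fun e' he' => hinv e' (List.mem_cons_of_mem _ he')
    rw [List.foldl_cons, List.filter_cons]
    by_cases hseen : PySem.Set.contains seen e.2.2 = true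
    · have hcore : PySem.Dict.contains core e.2.2 = true := hinv_e ▸ hseen
      have hA : pvStepA rl (core, seen) e = (core, seen) := by
        unfold pvStepA
        rw [if_pos hseen]
      rw [hA]
      by_cases hpres : pvPres rl e = true
      · rw [if_pos hpres, List.foldl_cons]
        have hB : pvStepB rl core e = core := by
          unfold pvStepB
          rw [if_pos hcore]
        rw [hB]
        exact ih core seen hinv'
      · rw [if_neg hpres]
        exact ih core seen hinv'
    · have hseenf : PySem.Set.contains seen e.2.2 = false := by
        rw [Bool.not_eq_true] at hseen; exact hseen
      have hcore : PySem.Dict.contains core e.2.2 = false := hinv_e ▸ hseenf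
      have hcoren : ¬ (PySem.Dict.contains core e.2.2 = true) := by
        rw [hcore]; exact Bool.false_ne_true
      by_cases hv : PySem.Str.strip (PySem.Dict.getD rl e.2.1 "") ≠ ""
      · have hcrl : PySem.Dict.contains rl e.2.1 = true := by
          by_contra hc
          rw [Bool.not_eq_true] at hc
          rw [PySem.Dict.getD_of_not_contains rl "" hc] at hv
          exact hv rfl
        have hpres : pvPres rl e = true := by
          unfold pvPres
          rw [hcrl]
          simpa using hv
        have hA : pvStepA rl (core, seen) e =
            (PySem.Dict.insert core e.2.2 (PySem.Str.strip (PySem.Dict.getD rl e.2.1 "")),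
             PySem.Set.add seen e.2.2) := by
          unfold pvStepA
          rw [if_neg hseen]
          exact if_pos hv
        have hB : pvStepB rl core e =
            PySem.Dict.insert core e.2.2 (PySem.Str.strip (PySem.Dict.getD rl e.2.1 "")) := by
          unfold pvStepB
          rw [if_neg hcoren]
        rw [hA, if_pos hpres, List.foldl_cons, hB]
        refine ih _ _ ?_
        intro e' he'
        rw [PySem.Dict.contains_insert]
        rcases eq_or_ne e'.2.2 e.2.2 with heq | hne
        · have h1 : PySem.Set.contains (PySem.Set.add seen e.2.2) e'.2.2 = true := by
            rw [PySem.Set.contains_iff, PySem.Set.mem_add]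
            exact Or.inr heq
          have h2 : (e'.2.2 == e.2.2) = true := by simpa using heq
          rw [h1, h2, Bool.true_or]
        · have h2 : (e'.2.2 == e.2.2) = false := by simpa using hne
          rw [h2, Bool.false_or, ← hinv' e' he']
          have hl : PySem.Set.contains (PySem.Set.add seen e.2.2) e'.2.2 = true ↔
              PySem.Set.contains seen e'.2.2 = true := by
            rw [PySem.Set.contains_iff, PySem.Set.contains_iff, PySem.Set.mem_add]
            constructor
            · rintro (h | h)
              · exact h
              · exact absurd h hne
            · exact Or.inl
          exact Bool.eq_iff_iff.mpr hl
      · have hA : pvStepA rl (core, seen) e = (core, seen) := by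
          unfold pvStepA
          rw [if_neg hseen]
          exact if_neg hv
        have hpresn : ¬ (pvPres rl e = true) := by
          unfold pvPres
          rw [not_not] at hv
          simp [hv]
        rw [hA, if_neg hpresn]
        exact ih core seen hinv'

lemma pvInit_inv (raw : PySem.Dict String String) :
    ∀ e ∈ pvTbl, PySem.Set.contains PySem.Set.empty e.2.2 = PySem.Dict.contains (pvCore0 raw) e.2.2 := by
  intro e he
  have hne := pvTbl_field_ne_pages e he
  have hl : PySem.Set.contains PySem.Set.empty e.2.2 = false := by
    simp [PySem.Set.contains, PySem.Set.empty]
  rw [hl]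
  unfold pvCore0
  split
  · rw [PySem.Dict.contains_insert]
    simp [hne, PySem.Dict.contains_empty]
  · simp [PySem.Dict.contains_empty]

lemma pvMid_eq (raw : PySem.Dict String String) :
    pvMidA (pvRawLower raw) (pvCore0 raw) = pvMidB (pvRawLower raw) (pvCore0 raw) := by
  have hnd := pvRawLower_nodup raw
  rw [pvMidA_eq, pvMidB_eq _ _ hnd]
  exact pvBridge (pvRawLower raw) pvTbl (pvCore0 raw) PySem.Set.empty (pvInit_inv raw)

-- ===== VERDICT (by name: the statement is the Claim_ definition above) =====
theorem map_raw_to_core_spec : Claim_equal_map_raw_to_core := by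
  intro raw_meta _
  unfold Spec_map_raw_to_core
  simp only [map_raw_to_core, map_raw_to_core_alt]
  rw [pvMid_eq, pvMapped_eq]
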